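-- pv_equiv track=rewrite | github.com/BloodWorkXGaming/WarframeRelicReader | warframe/Screenshot.py | strip_name
-- ===== SOURCE A (Python) =====
-- def strip_name(name: str) -> str:
--     cleaned = " "
--     last_char_space = True
--     name = name.replace("ı", "i").replace(" : ", ":")
--     has_colon = False
--
--     for c in name:
--         if not (c.isalpha() or c == ":" or c == " "):
--             continue
--         if c == ":" and has_colon:
--             continue
--         if c.isupper() and not last_char_space:
--             cleaned += " "
--
--         if c == ":":
--             has_colon = True
--         cleaned += c
--         last_char_space = c == " "
--
--     cleaned = cleaned.strip().replace("   ", " ").replace("  ", " ").strip()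
--
--     return cleaned
-- ===== SOURCE B (Python) =====
-- def _keep(s):
--     return "".join(c for c in s if c.isalpha() or c == " ")
--
-- def strip_name(name: str) -> str:
--     # Stateless decomposition: split at the first ':' and pure-filter each side,
--     # then insert spaces before uppercase chars via a zip-with-previous pass.
--     name = name.replace("ı", "i").replace(" : ", ":")
--     if ":" in name:
--         before, after = name.split(":", 1)
--         interm = " " + _keep(before) + ":" + _keep(after)
--     else:
--         interm = " " + _keep(name)
--     cleaned = interm[0] + "".join(
--         (" " + c) if (c.isupper() and p != " ") else c
--         for p, c in zip(interm, interm[1:]))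
--     return cleaned.strip().replace("   ", " ").replace("  ", " ").strip()
-- ===== Notes on version B (the rewrite author's own statement) =====
-- stated objective: alternative
-- what changed: A's fused stateful loop (filter + first-colon flag + space-insertion with carried flags) is replaced by a stateless decomposition: split the name at the first ':' and pure-filter each side to alpha/space, then insert spaces before uppercase chars with a zip-with-previous comprehension; the final strip/replace chain is unchanged.
import Mathlib
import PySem

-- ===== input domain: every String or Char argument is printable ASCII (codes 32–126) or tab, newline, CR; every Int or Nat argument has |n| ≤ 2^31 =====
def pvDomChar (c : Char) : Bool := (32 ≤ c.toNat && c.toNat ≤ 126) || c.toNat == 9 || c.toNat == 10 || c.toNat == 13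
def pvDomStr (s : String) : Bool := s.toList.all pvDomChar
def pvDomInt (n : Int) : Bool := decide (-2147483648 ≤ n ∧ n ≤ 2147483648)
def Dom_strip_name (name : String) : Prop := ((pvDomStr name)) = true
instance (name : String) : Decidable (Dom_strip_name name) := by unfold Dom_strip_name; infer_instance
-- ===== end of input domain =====

-- B replaces A's fused stateful loop by a stateless decomposition (split at the first ':',
-- pure filter each side, zip-with-previous space insertion); objective: alternative, same cost.

-- ===== PORT A =====
-- one loop iteration of A: state = (cleaned, last_char_space, has_colon)
def stripNameStepA (st : List Char × Bool × Bool) (c : Char) : List Char × Bool × Bool :=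
  if !(PySem.Chars.isalpha c || c == ':' || c == ' ') then st
  else if c == ':' && st.2.2 then st
  else
    let cleaned := if PySem.Chars.isupper c && !st.2.1 then st.1 ++ [' '] else st.1
    let hc := if c == ':' then true else st.2.2
    (cleaned ++ [c], c == ' ', hc)

def strip_name (name : String) : String :=
  let cs := PySem.Chars.replace (PySem.Chars.replace name.toList "ı".toList "i".toList) " : ".toList ":".toList
  let st := cs.foldl stripNameStepA ([' '], true, false)
  let cleaned := PySem.Chars.strip
    (PySem.Chars.replace (PySem.Chars.replace (PySem.Chars.strip st.1) "   ".toList " ".toList) "  ".toList " ".toList)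
  String.ofList cleaned

-- ===== PORT B =====
-- _keep: pure filter, alpha or space
def keepAS (cs : List Char) : List Char := cs.filter (fun c => PySem.Chars.isalpha c || c == ' ')

-- zip-with-previous body: insert ' ' before an uppercase char whose previous char is not a space
def insSpace (pc : Char × Char) : List Char :=
  if PySem.Chars.isupper pc.2 && pc.1 != ' ' then [' ', pc.2] else [pc.2]

def strip_name_alt (name : String) : String :=
  let cs := PySem.Chars.replace (PySem.Chars.replace name.toList "ı".toList "i".toList) " : ".toList ":".toList
  -- name.split(":", 1) ported by hand as takeWhile/dropWhile (exact for a one-char separator)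
  let interm :=
    if ':' ∈ cs then
      ' ' :: keepAS (cs.takeWhile (· != ':')) ++ ':' :: keepAS ((cs.dropWhile (· != ':')).drop 1)
    else ' ' :: keepAS cs
  -- interm[0] is headI: interm is nonempty by construction (leading ' ')
  let cleaned := interm.headI :: (interm.zip interm.tail).flatMap insSpace
  let cleaned := PySem.Chars.strip
    (PySem.Chars.replace (PySem.Chars.replace (PySem.Chars.strip cleaned) "   ".toList " ".toList) "  ".toList " ".toList)
  String.ofList cleaned

-- ===== PRECONDITION & SPEC =====
def Spec_strip_name (name : String) (out : String) : Prop := out = strip_name_alt name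
instance (name : String) (out : String) : Decidable (Spec_strip_name name out) := by unfold Spec_strip_name; infer_instance

-- ===== CLAIM =====
def Claim_equal_strip_name : Prop := ∀ (name : String), Dom_strip_name name → Spec_strip_name name (strip_name name)

-- ===== LEMMAS AND PROOFS =====

-- proof-only helpers: A's loop factored into two staged passes
def stripNamePass1Step (st : List Char × Bool) (c : Char) : List Char × Bool :=
  if PySem.Chars.isalpha c || c == ' ' then (st.1 ++ [c], st.2)
  else if c == ':' && !st.2 then (st.1 ++ [c], true)
  else st

def stripNamePass2Step (out : List Char) (c : Char) : List Char :=
  let out := if PySem.Chars.isupper c && !out.isEmpty && out.getLast? != some ' ' then out ++ [' '] else out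
  out ++ [c]

theorem pass2Step_getLast? (out : List Char) (c : Char) :
    (stripNamePass2Step out c).getLast? = some c := by
  unfold stripNamePass2Step; split <;> simp

theorem pass2Step_ne_nil (out : List Char) (c : Char) :
    stripNamePass2Step out c ≠ [] := by
  unfold stripNamePass2Step; split <;> simp

theorem pass2_getLast? (xs : List Char) (c : Char) (init : List Char) :
    ((xs ++ [c]).foldl stripNamePass2Step init).getLast? = some c := by
  rw [List.foldl_append]; simp [pass2Step_getLast?]

-- A's fused loop state equals pass2 applied to pass1's state
theorem fused_eq_two_pass (cs : List Char) (interm : List Char) (hc : Bool)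
    (hne : interm ≠ []) :
    cs.foldl stripNameStepA
      (interm.foldl stripNamePass2Step [], interm.getLast? == some ' ', hc)
    = (((cs.foldl stripNamePass1Step (interm, hc)).1).foldl stripNamePass2Step [],
       ((cs.foldl stripNamePass1Step (interm, hc)).1).getLast? == some ' ',
       (cs.foldl stripNamePass1Step (interm, hc)).2) := by
  induction cs generalizing interm hc with
  | nil => simp
  | cons c rest ih =>
    simp only [List.foldl_cons]
    by_cases hkeep : (PySem.Chars.isalpha c || c == ':' || c == ' ') = true
    · by_cases hskip : (c == ':' && hc) = true
      · have hcol : c = ':' := beq_iff_eq.mp ((Bool.and_eq_true _ _).mp hskip).1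
        have hc' : hc = true := ((Bool.and_eq_true _ _).mp hskip).2
        have hA : stripNameStepA (interm.foldl stripNamePass2Step [], interm.getLast? == some ' ', hc) c
            = (interm.foldl stripNamePass2Step [], interm.getLast? == some ' ', hc) := by
          simp [stripNameStepA, hkeep, hskip]
        have hB : stripNamePass1Step (interm, hc) c = (interm, hc) := by
          subst hcol hc'
          simp [stripNamePass1Step, show PySem.Chars.isalpha ':' = false from by decide]
        rw [hA, hB]
        exact ih interm hc hne
      · have hsk : (c == ':' && hc) = false := Bool.eq_false_iff.mpr hskip
        have hlast : interm.getLast? = some (interm.getLast hne) :=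
          List.getLast?_eq_some_getLast hne
        have hp2last : (interm.foldl stripNamePass2Step []).getLast? = interm.getLast? := by
          conv_lhs => rw [← List.dropLast_concat_getLast hne]
          rw [pass2_getLast?, hlast]
        have hp2ne : interm.foldl stripNamePass2Step [] ≠ [] := by
          conv_lhs => rw [← List.dropLast_concat_getLast hne]
          rw [List.foldl_append]
          simp only [List.foldl_cons, List.foldl_nil]
          exact pass2Step_ne_nil _ _
        have hiso : (interm.foldl stripNamePass2Step []).isEmpty = false := by simp [hp2ne]
        have hA : stripNameStepA (interm.foldl stripNamePass2Step [], interm.getLast? == some ' ', hc) c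
            = ((interm ++ [c]).foldl stripNamePass2Step [], c == ' ',
               if c == ':' then true else hc) := by
          rw [List.foldl_append]
          simp only [List.foldl_cons, List.foldl_nil]
          simp [stripNameStepA, stripNamePass2Step, hkeep, hsk, hp2last, hiso, bne]
        have hB : stripNamePass1Step (interm, hc) c =
            (interm ++ [c], if c == ':' then true else hc) := by
          by_cases halph : (PySem.Chars.isalpha c || c == ' ') = true
          · have hnc : (c == ':') = false := by
              apply Bool.eq_false_iff.mpr
              intro h
              have hcc : c = ':' := beq_iff_eq.mp h
              subst hcc
              rcases (Bool.or_eq_true _ _).mp halph with h1 | h1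
              · exact absurd h1 (by decide)
              · exact absurd h1 (by decide)
            simp [stripNamePass1Step, halph, hnc]
          · have hcol : (c == ':') = true := by
              rcases (Bool.or_eq_true _ _).mp hkeep with h | h
              · rcases (Bool.or_eq_true _ _).mp h with h1 | h1
                · exact absurd (show (PySem.Chars.isalpha c || c == ' ') = true by simp [h1]) halph
                · exact h1
              · exact absurd (show (PySem.Chars.isalpha c || c == ' ') = true by simp [h]) halph
            have hhc : hc = false := by
              apply Bool.eq_false_iff.mpr
              intro h
              rw [hcol, h] at hsk; exact absurd hsk (by decide)
            have halph' : (PySem.Chars.isalpha c || c == ' ') = false := Bool.eq_false_iff.mpr halph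
            simp [stripNamePass1Step, halph', hcol, hhc]
        rw [hA, hB]
        have := ih (interm ++ [c]) (if c == ':' then true else hc) (by simp)
        simp only [List.getLast?_concat] at this
        simpa using this
    · have hkeep' : (PySem.Chars.isalpha c || c == ':' || c == ' ') = false :=
        Bool.eq_false_iff.mpr hkeep
      have h1 : (PySem.Chars.isalpha c || c == ' ') = false := by
        rcases (Bool.or_eq_false_iff).mp hkeep' with ⟨h2, h3⟩
        rcases (Bool.or_eq_false_iff).mp h2 with ⟨h4, _⟩
        simp [h4, h3]
      have h2 : (c == ':') = false := ((Bool.or_eq_false_iff).mp ((Bool.or_eq_false_iff).mp hkeep').1).2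
      have hA : stripNameStepA (interm.foldl stripNamePass2Step [], interm.getLast? == some ' ', hc) c
          = (interm.foldl stripNamePass2Step [], interm.getLast? == some ' ', hc) := by
        simp [stripNameStepA, hkeep']
      have hB : stripNamePass1Step (interm, hc) c = (interm, hc) := by
        simp [stripNamePass1Step, h1, h2]
      rw [hA, hB]
      exact ih interm hc hne

-- pass1 with the colon flag already set is a pure filter
theorem pass1_true (cs : List Char) : ∀ acc : List Char,
    cs.foldl stripNamePass1Step (acc, true) = (acc ++ keepAS cs, true) := by
  induction cs with
  | nil => simp [keepAS]
  | cons c rest ih =>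
    intro acc
    by_cases h : (PySem.Chars.isalpha c || c == ' ') = true
    · simp [stripNamePass1Step, h, keepAS, ih]
    · have h' : (PySem.Chars.isalpha c || c == ' ') = false := Bool.eq_false_iff.mpr h
      simp [stripNamePass1Step, h', keepAS, ih]

-- pass1 from a clear flag: split at the first ':' and filter each side
theorem pass1_false (cs : List Char) : ∀ acc : List Char,
    cs.foldl stripNamePass1Step (acc, false) =
      if ':' ∈ cs then
        (acc ++ keepAS (cs.takeWhile (· != ':')) ++ ':' :: keepAS ((cs.dropWhile (· != ':')).drop 1), true)
      else (acc ++ keepAS cs, false) := by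
  induction cs with
  | nil => simp [keepAS]
  | cons c rest ih =>
    intro acc
    by_cases hcol : c = ':'
    · subst hcol
      have hstep : stripNamePass1Step (acc, false) ':' = (acc ++ [':'], true) := by
        simp [stripNamePass1Step, show PySem.Chars.isalpha ':' = false from by decide]
      simp [List.foldl_cons, hstep, pass1_true, List.takeWhile, List.dropWhile, keepAS]
    · have hne : (c == ':') = false := by simp [hcol]
      have hcol' : ':' ≠ c := fun h => hcol h.symm
      by_cases h : (PySem.Chars.isalpha c || c == ' ') = true
      · have hstep : stripNamePass1Step (acc, false) c = (acc ++ [c], false) := by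
          simp [stripNamePass1Step, h]
        simp only [List.foldl_cons, hstep, ih]
        by_cases hm : ':' ∈ rest <;>
          simp [hm, hcol, hcol', keepAS, h]
      · have h' : (PySem.Chars.isalpha c || c == ' ') = false := Bool.eq_false_iff.mpr h
        have hstep : stripNamePass1Step (acc, false) c = (acc, false) := by
          simp [stripNamePass1Step, h', hne]
        simp only [List.foldl_cons, hstep, ih]
        by_cases hm : ':' ∈ rest <;>
          simp [hm, hcol, hcol', keepAS, h']

-- pass2 as a zip-with-previous flatMap
theorem pass2_zip (t : List Char) : ∀ (out : List Char) (c : Char),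
    t.foldl stripNamePass2Step (out ++ [c]) = out ++ c :: ((c :: t).zip t).flatMap insSpace := by
  induction t with
  | nil => simp
  | cons r rs ih =>
    intro out c
    by_cases h : PySem.Chars.isupper r = true ∧ ¬ c = ' '
    · have hstep : stripNamePass2Step (out ++ [c]) r = (out ++ c :: [' ']) ++ [r] := by
        unfold stripNamePass2Step
        simp [bne, h.1, h.2]
      simp only [List.foldl_cons, hstep, ih]
      simp [insSpace, bne, h.1, h.2]
    · have hstep : stripNamePass2Step (out ++ [c]) r = out ++ [c] ++ [r] := by
        unfold stripNamePass2Step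
        simp only [List.getLast?_concat, bne]
        rw [if_neg]
        intro hh
        simp at hh
        exact h ⟨hh.1, fun he => by simp [he] at hh⟩
      have := ih (out ++ [c]) r
      simp only [List.foldl_cons, hstep]
      rw [show out ++ [c] ++ [r] = (out ++ [c]) ++ [r] from rfl, this]
      have hins : insSpace (c, r) = [r] := by
        unfold insSpace
        rw [if_neg]
        intro hh
        simp [bne] at hh
        exact h ⟨hh.1, hh.2⟩
      simp [hins]

-- ===== VERDICT =====
theorem strip_name_spec : Claim_equal_strip_name := by
  intro name _
  unfold Spec_strip_name strip_name strip_name_alt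
  have h := fused_eq_two_pass
    (PySem.Chars.replace (PySem.Chars.replace name.toList "ı".toList "i".toList) " : ".toList ":".toList)
    [' '] false (by simp)
  rw [show ([' '].foldl stripNamePass2Step [] : List Char) = [' '] from by decide,
    show (([' '] : List Char).getLast? == some ' ') = true from by decide] at h
  have h1 := congrArg Prod.fst h
  simp only at h1
  rw [pass1_false] at h1
  set cs := PySem.Chars.replace (PySem.Chars.replace name.toList "ı".toList "i".toList) " : ".toList ":".toList with hcs
  by_cases hm : ':' ∈ cs
  · simp only [hm, if_true] at h1 ⊢
    rw [h1, show ([' '] : List Char) ++ keepAS (cs.takeWhile (· != ':')) ++ ':' :: keepAS ((cs.dropWhile (· != ':')).drop 1)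
        = [] ++ [' '] ++ (keepAS (cs.takeWhile (· != ':')) ++ ':' :: keepAS ((cs.dropWhile (· != ':')).drop 1)) from by simp]
    rw [List.foldl_append, show List.foldl stripNamePass2Step [] ([] ++ [' ']) = [] ++ [' '] from by decide, pass2_zip]
    simp [List.headI]
  · simp only [hm, if_false] at h1 ⊢
    rw [h1, show ([' '] : List Char) ++ keepAS cs = [] ++ [' '] ++ keepAS cs from by simp]
    rw [List.foldl_append, show List.foldl stripNamePass2Step [] ([] ++ [' ']) = [] ++ [' '] from by decide, pass2_zip]
    simp [List.headI]
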